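-- pv_equiv track=rewrite | github.com/aconaway1/neighbor-mapper | app/app.py | parse_cdp_neighbors_detail
-- ===== SOURCE A (Python) =====
-- def parse_cdp_neighbors_detail(output: str):
--     # TODO: robust parsing; this is just a sketch
--     neighbors = []
--     current = {}
--     for line in output.splitlines():
--         line = line.strip()
--         if line.startswith("Device ID:"):
--             if current:
--                 neighbors.append(current)
--                 current = {}
--             current["remote_device"] = line.split("Device ID:")[1].strip()
--         elif line.startswith("IP address:"):
--             current["remote_ip"] = line.split("IP address:")[1].strip()
--         elif line.startswith("Interface:"):
--             parts = line.split(",")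
--             local_intf = parts[0].split("Interface:")[1].strip()
--             remote_intf = parts[1].split("Port ID (outgoing port):")[1].strip()
--             current["local_intf"] = local_intf
--             current["remote_intf"] = remote_intf
--     if current:
--         neighbors.append(current)
--     return neighbors
-- ===== SOURCE B (Python) =====
-- # Two-pass parser: first group the stripped lines into per-neighbor blocks
-- # (a new block starts at each "Device ID:" line), then turn each block into
-- # a record and keep the non-empty ones.
--
-- def _parse_block(lines):
--     record = {}
--     for line in lines:
--         if line.startswith("Device ID:"):
--             record["remote_device"] = line.split("Device ID:")[1].strip()
--         elif line.startswith("IP address:"):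
--             record["remote_ip"] = line.split("IP address:")[1].strip()
--         elif line.startswith("Interface:"):
--             parts = line.split(",")
--             record["local_intf"] = parts[0].split("Interface:")[1].strip()
--             record["remote_intf"] = parts[1].split("Port ID (outgoing port):")[1].strip()
--     return record
--
-- def parse_cdp_neighbors_detail(output: str):
--     blocks = []
--     cur = []
--     for raw in output.splitlines():
--         line = raw.strip()
--         if line.startswith("Device ID:") and cur:
--             blocks.append(cur)
--             cur = []
--         cur.append(line)
--     blocks.append(cur)
--     return [rec for rec in map(_parse_block, blocks) if rec]
-- ===== Notes on version B (the rewrite author's own statement) =====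
-- stated objective: alternative
-- what changed: A builds the records in a single pass with a mutating current-dict that is flushed whenever a new 'Device ID:' line arrives and once more at the end; B first groups the stripped lines into per-neighbor blocks at 'Device ID:' boundaries and then maps each block to a record, keeping the non-empty ones. Pre_ excludes only inputs on which A raises IndexError (an 'Interface:' line without a comma or without 'Port ID (outgoing port):' in its second comma-field).
import Mathlib
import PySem

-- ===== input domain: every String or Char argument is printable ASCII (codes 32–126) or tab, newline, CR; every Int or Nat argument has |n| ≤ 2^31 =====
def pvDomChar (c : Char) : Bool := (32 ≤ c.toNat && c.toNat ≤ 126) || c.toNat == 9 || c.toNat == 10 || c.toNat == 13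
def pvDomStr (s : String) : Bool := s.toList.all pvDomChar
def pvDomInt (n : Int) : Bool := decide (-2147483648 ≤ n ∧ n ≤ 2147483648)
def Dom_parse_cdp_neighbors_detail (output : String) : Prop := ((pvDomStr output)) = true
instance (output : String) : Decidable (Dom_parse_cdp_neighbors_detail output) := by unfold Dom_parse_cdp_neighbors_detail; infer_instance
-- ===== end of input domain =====

-- B replaces A's one-pass mutating-dict scan by a two-pass parse (group lines into per-neighbor
-- blocks, then map each block to a record); same cost, structural alternative. Equal return
-- values proved on Pre_.

-- ===== PORT A =====
-- loop body of A (on the already-stripped line; A strips at the top of the loop body)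
def pvStepA (st : List (PySem.Dict String String) × PySem.Dict String String) (line : String) :
    List (PySem.Dict String String) × PySem.Dict String String :=
  if PySem.Str.startswith line "Device ID:" then
    let st' := if st.2.items.isEmpty then st else (st.1 ++ [st.2], PySem.Dict.empty)
    (st'.1, st'.2.insert "remote_device"
      (PySem.Str.strip (PySem.List.pyGetD ((PySem.Str.split? line "Device ID:").getD []) 1 "")))
  else if PySem.Str.startswith line "IP address:" then
    (st.1, st.2.insert "remote_ip"
      (PySem.Str.strip (PySem.List.pyGetD ((PySem.Str.split? line "IP address:").getD []) 1 "")))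
  else if PySem.Str.startswith line "Interface:" then
    let parts := (PySem.Str.split? line ",").getD []
    let local_intf := PySem.Str.strip (PySem.List.pyGetD
      ((PySem.Str.split? (PySem.List.pyGetD parts 0 "") "Interface:").getD []) 1 "")
    let remote_intf := PySem.Str.strip (PySem.List.pyGetD
      ((PySem.Str.split? (PySem.List.pyGetD parts 1 "") "Port ID (outgoing port):").getD []) 1 "")
    (st.1, (st.2.insert "local_intf" local_intf).insert "remote_intf" remote_intf)
  else st

-- final flush + return-value conversion (list of dicts → list of item lists)
def pvFinishA (st : List (PySem.Dict String String) × PySem.Dict String String) :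
    List (List (String × String)) :=
  (st.1 ++ (if st.2.items.isEmpty then [] else [st.2])).map (·.items)

def parse_cdp_neighbors_detail (output : String) : List (List (String × String)) :=
  pvFinishA ((PySem.Str.splitlines output).foldl
    (fun st raw => pvStepA st (PySem.Str.strip raw)) ([], PySem.Dict.empty))

-- ===== PORT B =====
def pvSplit (s sep : String) : List String := (PySem.Str.split? s sep).getD []

def pvDevVal (l : String) : String :=
  PySem.Str.strip (PySem.List.pyGetD (pvSplit l "Device ID:") 1 "")

def pvIpVal (l : String) : String :=
  PySem.Str.strip (PySem.List.pyGetD (pvSplit l "IP address:") 1 "")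

def pvLocVal (l : String) : String :=
  PySem.Str.strip (PySem.List.pyGetD
    (pvSplit (PySem.List.pyGetD (pvSplit l ",") 0 "") "Interface:") 1 "")

def pvRemVal (l : String) : String :=
  PySem.Str.strip (PySem.List.pyGetD
    (pvSplit (PySem.List.pyGetD (pvSplit l ",") 1 "") "Port ID (outgoing port):") 1 "")

-- loop body of B's _parse_block
def pvBStep (record : PySem.Dict String String) (line : String) : PySem.Dict String String :=
  if PySem.Str.startswith line "Device ID:" then record.insert "remote_device" (pvDevVal line)
  else if PySem.Str.startswith line "IP address:" then record.insert "remote_ip" (pvIpVal line)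
  else if PySem.Str.startswith line "Interface:" then
    (record.insert "local_intf" (pvLocVal line)).insert "remote_intf" (pvRemVal line)
  else record

def pvParseBlock (lines : List String) : PySem.Dict String String :=
  lines.foldl pvBStep PySem.Dict.empty

-- grouping loop body of B (on the already-stripped line)
def pvGStep (st : List (List String) × List String) (line : String) :
    List (List String) × List String :=
  if PySem.Str.startswith line "Device ID:" && !st.2.isEmpty
  then (st.1 ++ [st.2], [line]) else (st.1, st.2 ++ [line])

-- close the last block, parse each block, keep non-empty records, convert to item lists
def pvFinishB (st : List (List String) × List String) : List (List (String × String)) :=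
  (((st.1 ++ [st.2]).map pvParseBlock).filter (fun d => !d.items.isEmpty)).map (·.items)

def parse_cdp_neighbors_detail_alt (output : String) : List (List (String × String)) :=
  pvFinishB ((PySem.Str.splitlines output).foldl
    (fun st raw => pvGStep st (PySem.Str.strip raw)) ([], []))

-- ===== PRECONDITION & SPEC =====
-- Pre_ excludes exactly the inputs on which Python A raises IndexError: a stripped line that
-- starts with "Interface:" but contains no comma, or whose second comma-field does not contain
-- "Port ID (outgoing port):".
def Pre_parse_cdp_neighbors_detail (output : String) : Prop :=
  ∀ raw ∈ PySem.Str.splitlines output,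
    PySem.Str.startswith (PySem.Str.strip raw) "Interface:" = true →
      2 ≤ ((PySem.Str.split? (PySem.Str.strip raw) ",").getD []).length ∧
      PySem.Str.isIn "Port ID (outgoing port):"
        (PySem.List.pyGetD ((PySem.Str.split? (PySem.Str.strip raw) ",").getD []) 1 "") = true
instance (output : String) : Decidable (Pre_parse_cdp_neighbors_detail output) := by
  unfold Pre_parse_cdp_neighbors_detail; infer_instance

def pvWitness_parse_cdp_neighbors_detail : String := "Device ID: r1\nIP address: 10.0.0.1"

def Spec_parse_cdp_neighbors_detail (output : String) (out : List (List (String × String))) : Prop := out = parse_cdp_neighbors_detail_alt output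
instance (output : String) (out : List (List (String × String))) : Decidable (Spec_parse_cdp_neighbors_detail output out) := by unfold Spec_parse_cdp_neighbors_detail; infer_instance

-- ===== CLAIM (what is proved, stated in full; the proofs are below) =====
def Claim_equal_parse_cdp_neighbors_detail : Prop := ∀ (output : String), Dom_parse_cdp_neighbors_detail output → Pre_parse_cdp_neighbors_detail output → Spec_parse_cdp_neighbors_detail output (parse_cdp_neighbors_detail output)

-- ===== LEMMAS AND PROOFS =====

def pvFlush (d : PySem.Dict String String) : List (PySem.Dict String String) :=
  if d.items.isEmpty then [] else [d]

-- recursive characterisation of A's loop + final flush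
def pvRunA (d : PySem.Dict String String) : List String → List (PySem.Dict String String)
  | [] => pvFlush d
  | l :: ls =>
      if PySem.Str.startswith l "Device ID:" then
        pvFlush d ++ pvRunA (pvBStep PySem.Dict.empty l) ls
      else pvRunA (pvBStep d l) ls

-- recursive characterisation of B's grouping loop
def pvGroup : List String → List String → List (List String)
  | cur, [] => [cur]
  | cur, l :: ls =>
      if PySem.Str.startswith l "Device ID:" && !cur.isEmpty
      then cur :: pvGroup [l] ls else pvGroup (cur ++ [l]) ls

def pvOut (bs : List (List String)) : List (PySem.Dict String String) :=
  (bs.map pvParseBlock).filter (fun d => !d.items.isEmpty)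

theorem pvStepA_eq (ns : List (PySem.Dict String String)) (d : PySem.Dict String String)
    (l : String) :
    pvStepA (ns, d) l =
      if PySem.Str.startswith l "Device ID:" then
        (ns ++ pvFlush d, pvBStep PySem.Dict.empty l)
      else (ns, pvBStep d l) := by
  unfold pvStepA pvBStep pvFlush pvDevVal pvIpVal pvLocVal pvRemVal pvSplit
  split_ifs with h1 h2 <;> simp_all
  have hd : d = PySem.Dict.empty := PySem.Dict.ext (by simpa using h2)
  rw [hd]

theorem pv_foldA (ls : List String) (ns : List (PySem.Dict String String))
    (d : PySem.Dict String String) :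
    (ls.foldl pvStepA (ns, d)).1 ++ pvFlush (ls.foldl pvStepA (ns, d)).2 = ns ++ pvRunA d ls := by
  induction ls generalizing ns d with
  | nil => simp [pvRunA]
  | cons l ls IH =>
      rw [List.foldl_cons, pvStepA_eq]
      by_cases h : PySem.Str.startswith l "Device ID:" = true
      · rw [if_pos h, IH]
        simp only [pvRunA]
        rw [if_pos h, List.append_assoc]
      · rw [if_neg h, IH]
        simp only [pvRunA]
        rw [if_neg h]

theorem pv_groupFold (ls : List String) (blocks : List (List String)) (cur : List String) :
    (ls.foldl pvGStep (blocks, cur)).1 ++ [(ls.foldl pvGStep (blocks, cur)).2]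
      = blocks ++ pvGroup cur ls := by
  induction ls generalizing blocks cur with
  | nil => simp [pvGroup]
  | cons l ls IH =>
      rw [List.foldl_cons]
      by_cases h : (PySem.Str.startswith l "Device ID:" && !cur.isEmpty) = true
      · rw [show pvGStep (blocks, cur) l = (blocks ++ [cur], [l]) from by
          unfold pvGStep; rw [if_pos h], IH]
        simp only [pvGroup]
        rw [if_pos h, List.append_assoc, List.singleton_append]
      · rw [show pvGStep (blocks, cur) l = (blocks, cur ++ [l]) from by
          unfold pvGStep; rw [if_neg h], IH]
        simp only [pvGroup]
        rw [if_neg h]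

theorem pv_runA_group (ls : List String) : ∀ cur,
    pvRunA (pvParseBlock cur) ls = pvOut (pvGroup cur ls) := by
  induction ls with
  | nil =>
      intro cur
      simp only [pvGroup, pvOut, List.map_cons, List.map_nil, pvRunA, pvFlush]
      by_cases h : (pvParseBlock cur).items.isEmpty = true
      · rw [if_pos h]; simp [h]
      · rw [if_neg h]; simp [h]
  | cons l ls IH =>
      intro cur
      simp only [pvGroup]
      by_cases hc : (PySem.Str.startswith l "Device ID:" && !cur.isEmpty) = true
      · rw [if_pos hc]
        have hdev : PySem.Str.startswith l "Device ID:" = true := (Bool.and_eq_true _ _ |>.mp hc).1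
        simp only [pvRunA]
        rw [if_pos hdev]
        have hfold : pvBStep PySem.Dict.empty l = pvParseBlock [l] := by
          simp [pvParseBlock]
        rw [hfold, IH [l]]
        simp only [pvOut, List.map_cons, List.filter_cons]
        by_cases h : (pvParseBlock cur).items.isEmpty = true
        · simp [pvFlush, h]
        · simp [pvFlush, h]
      · rw [if_neg hc, ← IH (cur ++ [l])]
        have happ : pvParseBlock (cur ++ [l]) = pvBStep (pvParseBlock cur) l := by
          simp [pvParseBlock]
        rw [happ]
        by_cases hdev : PySem.Str.startswith l "Device ID:" = true
        · have hcur : cur = [] := by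
            by_contra hne
            apply hc
            rw [hdev]
            simp [hne]
          subst hcur
          simp only [pvRunA]
          rw [if_pos hdev]
          rw [show pvFlush (pvParseBlock []) = [] from rfl, List.nil_append]
          rw [show pvParseBlock [] = PySem.Dict.empty from rfl]
        · rw [show pvRunA (pvParseBlock cur) (l :: ls)
              = pvRunA (pvBStep (pvParseBlock cur) l) ls from by
            simp only [pvRunA]; rw [if_neg hdev]]

-- ===== VERDICT (by name: the statement is the Claim_ definition above) =====
theorem parse_cdp_neighbors_detail_spec : Claim_equal_parse_cdp_neighbors_detail := by
  intro output _hdom _hpre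
  unfold Spec_parse_cdp_neighbors_detail
  unfold parse_cdp_neighbors_detail parse_cdp_neighbors_detail_alt pvFinishA pvFinishB
  have hA := pv_foldA ((PySem.Str.splitlines output).map PySem.Str.strip) [] PySem.Dict.empty
  have hG := pv_groupFold ((PySem.Str.splitlines output).map PySem.Str.strip) [] []
  have hR := pv_runA_group ((PySem.Str.splitlines output).map PySem.Str.strip) []
  simp only [List.foldl_map] at hA hG
  simp only [pvFlush] at hA
  rw [hA, hG]
  rw [List.nil_append, List.nil_append,
    show PySem.Dict.empty = pvParseBlock [] from rfl, hR, pvOut]
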